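-- pv_equiv track=rewrite | github.com/mbouchenoire/discloud | discloud/command.py | get_offset_needed
-- ===== SOURCE A (Python) =====
-- SMALL_CHARS = "tifjl1"
--
-- BIG_CHARS = "ADTVm05"
--
-- DOUBLE_CHARS = "MW"
--
-- def get_offset_needed(text: str) -> int:
--     offset = 0
--
--     for c in SMALL_CHARS:
--         offset += text.count(c)
--
--     for c in BIG_CHARS:
--         offset -= text.count(c)
--
--     for c in DOUBLE_CHARS:
--         offset -= text.count(c) * 3
--
--     return offset
-- ===== SOURCE B (Python) =====
-- SMALL_CHARS = "tifjl1"
--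
-- BIG_CHARS = "ADTVm05"
--
-- DOUBLE_CHARS = "MW"
--
-- WEIGHTS = {}
-- for _c in SMALL_CHARS:
--     WEIGHTS[_c] = 1
-- for _c in BIG_CHARS:
--     WEIGHTS[_c] = -1
-- for _c in DOUBLE_CHARS:
--     WEIGHTS[_c] = -3
--
-- def get_offset_needed(text: str) -> int:
--     return sum(WEIGHTS.get(c, 0) for c in text)
-- ===== Notes on version B (the rewrite author's own statement) =====
-- stated objective: alternative
-- what changed: Replaces thirteen full str.count scans of text with a single pass over text summing a precomputed per-character weight table (+1 small, -1 big, -3 double); asymptotically one traversal instead of thirteen, though CPython's C-level str.count makes A faster in practice.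
import Mathlib
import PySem

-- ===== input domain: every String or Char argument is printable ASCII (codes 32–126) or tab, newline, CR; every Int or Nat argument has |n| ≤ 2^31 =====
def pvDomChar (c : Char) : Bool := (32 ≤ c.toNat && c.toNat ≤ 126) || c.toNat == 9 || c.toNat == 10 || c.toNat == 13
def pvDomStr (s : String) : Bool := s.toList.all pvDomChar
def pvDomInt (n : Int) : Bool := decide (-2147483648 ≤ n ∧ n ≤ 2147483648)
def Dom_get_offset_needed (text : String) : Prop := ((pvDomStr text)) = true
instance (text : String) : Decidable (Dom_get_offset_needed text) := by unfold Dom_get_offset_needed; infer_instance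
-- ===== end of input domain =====

-- B replaces A's thirteen str.count scans of text with one pass over text summing a precomputed
-- per-character weight table (objective: alternative single-traversal algorithm; not measured faster).

-- ===== PORT A =====
def get_offset_needed (text : String) : Int :=
  let offset : Int := 0
  let offset := "tifjl1".toList.foldl (fun acc c => acc + (PySem.Str.count text (String.ofList [c]) : Int)) offset
  let offset := "ADTVm05".toList.foldl (fun acc c => acc - (PySem.Str.count text (String.ofList [c]) : Int)) offset
  let offset := "MW".toList.foldl (fun acc c => acc - (PySem.Str.count text (String.ofList [c]) : Int) * 3) offset
  offset

-- ===== PORT B =====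
-- the module-level WEIGHTS dict of Source B, built by the same three insertion loops
def pvWeights : PySem.Dict Char Int :=
  let d := "tifjl1".toList.foldl (fun d c => d.insert c 1) PySem.Dict.empty
  let d := "ADTVm05".toList.foldl (fun d c => d.insert c (-1)) d
  "MW".toList.foldl (fun d c => d.insert c (-3)) d

def get_offset_needed_alt (text : String) : Int :=
  (text.toList.map (fun c => pvWeights.getD c 0)).sum

-- ===== PRECONDITION & SPEC =====
def Spec_get_offset_needed (text : String) (out : Int) : Prop := out = get_offset_needed_alt text
instance (text : String) (out : Int) : Decidable (Spec_get_offset_needed text out) := by unfold Spec_get_offset_needed; infer_instance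

-- ===== CLAIM (what is proved, stated in full; the proofs are below) =====
def Claim_equal_get_offset_needed : Prop := ∀ (text : String), Dom_get_offset_needed text → Spec_get_offset_needed text (get_offset_needed text)

-- ===== LEMMAS AND PROOFS =====

lemma go_singleton (c : Char) : ∀ (l : List Char) (fuel acc : Nat), l.length ≤ fuel →
    PySem.Chars.count.go [c] fuel l acc = acc + l.count c := by
  intro l
  induction l with
  | nil => intro fuel acc h; cases fuel <;> simp [PySem.Chars.count.go]
  | cons hd t ih =>
    intro fuel acc h
    cases fuel with
    | zero => simp at h
    | succ f =>
      simp only [PySem.Chars.count.go]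
      by_cases hc : c = hd
      · subst hc
        rw [if_pos (by simp [List.isPrefixOf])]
        simp [ih f _ (by simpa using h)]
        omega
      · rw [if_neg (by simp [List.isPrefixOf, hc])]
        simp [ih f _ (by simpa using h), Ne.symm hc]

lemma count_singleton (s : String) (c : Char) :
    PySem.Str.count s (String.ofList [c]) = s.toList.count c := by
  simp only [PySem.Str.count]
  have h : (String.ofList [c]).toList = [c] := by simp
  rw [h, PySem.Chars.count]
  simp [go_singleton c s.toList s.length 0 (by simp)]

lemma weight_eq (c : Char) : pvWeights.getD c 0 =
    (if c = 'W' then -3 else if c = 'M' then -3 else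
     if c = '5' then -1 else if c = '0' then -1 else if c = 'm' then -1 else
     if c = 'V' then -1 else if c = 'T' then -1 else if c = 'D' then -1 else
     if c = 'A' then -1 else
     if c = '1' then 1 else if c = 'l' then 1 else if c = 'j' then 1 else
     if c = 'f' then 1 else if c = 'i' then 1 else if c = 't' then 1 else (0:Int)) := by
  have hW : pvWeights = (((((((((((((((PySem.Dict.empty.insert 't' 1).insert 'i' 1).insert 'f' 1).insert 'j' 1).insert 'l' 1).insert '1' 1).insert 'A' (-1)).insert 'D' (-1)).insert 'T' (-1)).insert 'V' (-1)).insert 'm' (-1)).insert '0' (-1)).insert '5' (-1)).insert 'M' (-3)).insert 'W' (-3)) := rfl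
  rw [hW]
  simp only [PySem.Dict.getD_insert, PySem.Dict.getD_empty]


set_option maxHeartbeats 1600000 in
lemma key (c : Char) :
    ((if (c == 't') = true then (1:Int) else 0) + (if (c == 'i') = true then 1 else 0)
     + (if (c == 'f') = true then 1 else 0) + (if (c == 'j') = true then 1 else 0)
     + (if (c == 'l') = true then 1 else 0) + (if (c == '1') = true then 1 else 0))
    - (if (c == 'A') = true then 1 else 0) - (if (c == 'D') = true then 1 else 0)
    - (if (c == 'T') = true then 1 else 0) - (if (c == 'V') = true then 1 else 0)
    - (if (c == 'm') = true then 1 else 0) - (if (c == '0') = true then 1 else 0)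
    - (if (c == '5') = true then 1 else 0)
    - (if (c == 'M') = true then 1 else 0) * 3 - (if (c == 'W') = true then 1 else 0) * 3
    = pvWeights.getD c 0 := by
  rw [weight_eq]
  simp only [beq_iff_eq]
  by_cases h1 : c = 't'
  · subst h1; decide
  by_cases h2 : c = 'i'
  · subst h2; decide
  by_cases h3 : c = 'f'
  · subst h3; decide
  by_cases h4 : c = 'j'
  · subst h4; decide
  by_cases h5 : c = 'l'
  · subst h5; decide
  by_cases h6 : c = '1'
  · subst h6; decide
  by_cases h7 : c = 'A'
  · subst h7; decide
  by_cases h8 : c = 'D'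
  · subst h8; decide
  by_cases h9 : c = 'T'
  · subst h9; decide
  by_cases h10 : c = 'V'
  · subst h10; decide
  by_cases h11 : c = 'm'
  · subst h11; decide
  by_cases h12 : c = '0'
  · subst h12; decide
  by_cases h13 : c = '5'
  · subst h13; decide
  by_cases h14 : c = 'M'
  · subst h14; decide
  by_cases h15 : c = 'W'
  · subst h15; decide
  simp [h1, h2, h3, h4, h5, h6, h7, h8, h9, h10, h11, h12, h13, h14, h15]

lemma main_eq (text : String) : get_offset_needed text = get_offset_needed_alt text := by
  unfold get_offset_needed get_offset_needed_alt
  simp only [show "tifjl1".toList = ['t','i','f','j','l','1'] from rfl,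
             show "ADTVm05".toList = ['A','D','T','V','m','0','5'] from rfl,
             show "MW".toList = ['M','W'] from rfl,
             List.foldl_cons, List.foldl_nil, count_singleton]
  induction text.toList with
  | nil => simp
  | cons c l ih =>
    simp only [List.count_cons, List.map_cons, List.sum_cons, Nat.cast_add, Nat.cast_ite,
               Nat.cast_one, Nat.cast_zero]
    rw [← ih, ← key c]
    ring

-- ===== VERDICT (by name: the statement is the Claim_ definition above) =====
theorem get_offset_needed_spec : Claim_equal_get_offset_needed := by
  intro text _
  unfold Spec_get_offset_needed
  exact main_eq text
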